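-- pv_equiv track=rewrite | github.com/wangsun39/leetcode | allcode/1900-1999/1954minimumPerimeter.py | minimumPerimeter
-- ===== SOURCE A (Python) =====
-- def minimumPerimeter(neededApples: int) -> int:
--
--     def calc(x):  # 计算顶点在(x,x)的正方形内的苹果数量
--         # 经过计算，这个正方形边缘的苹果数为 12*n*n
--         # 因此所有的苹果数为
--         return x * (x + 1) * (2 * x + 1) * 2
--
--     lo, hi = 0, 10 ** 5
--     while lo < hi - 1:
--         mid = (lo + hi) // 2
--         num = calc(mid)
--         if num == neededApples:
--             return mid * 8
--         if num < neededApples: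
--             lo = mid
--         else:
--             hi = mid
--     return 8 * hi
-- ===== SOURCE B (Python) =====
-- def minimumPerimeter(neededApples: int) -> int:
--     def calc(x):
--         return x * (x + 1) * (2 * x + 1) * 2
--
--     x = 1
--     while x < 100000 and calc(x) < neededApples:
--         x += 1
--     return 8 * x
-- ===== Notes on version B (the rewrite author's own statement) =====
-- stated objective: simpler
-- what changed: Replaced the binary search over [0,100000] (with an early-return equality branch) by a direct linear scan that increments x from 1 until calc(x) >= neededApples or x reaches the cap 100000.
import Mathlib
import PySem

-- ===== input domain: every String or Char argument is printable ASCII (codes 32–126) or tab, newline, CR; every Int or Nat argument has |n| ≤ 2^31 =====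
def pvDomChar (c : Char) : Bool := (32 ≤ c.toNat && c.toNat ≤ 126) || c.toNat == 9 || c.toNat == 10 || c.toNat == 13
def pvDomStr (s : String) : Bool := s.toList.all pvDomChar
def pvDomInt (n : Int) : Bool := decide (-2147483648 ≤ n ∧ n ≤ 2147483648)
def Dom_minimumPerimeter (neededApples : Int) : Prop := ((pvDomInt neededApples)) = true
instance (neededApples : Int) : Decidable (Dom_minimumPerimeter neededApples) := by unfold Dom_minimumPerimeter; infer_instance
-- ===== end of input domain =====

-- B replaces A's binary search by a plain linear scan from x = 1 up to the cap 100000 (simpler, same result).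


-- ===== PORT A =====
-- helper `calc` of A: apples inside the square with corner (x,x)
def calcA (x : Int) : Int := x * (x + 1) * (2 * x + 1) * 2

-- the while-loop of A, recursing on the shrinking bracket hi - lo
def loopA (neededApples lo hi : Int) : Int :=
  if _h : lo < hi - 1 then
    -- mid = (lo + hi) // 2 ; num = calc(mid), inlined
    if calcA (PySem.Int.floordiv (lo + hi) 2) = neededApples then
      PySem.Int.floordiv (lo + hi) 2 * 8
    else if calcA (PySem.Int.floordiv (lo + hi) 2) < neededApples then
      loopA neededApples (PySem.Int.floordiv (lo + hi) 2) hi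
    else loopA neededApples lo (PySem.Int.floordiv (lo + hi) 2)
  else 8 * hi
termination_by (hi - lo).toNat
decreasing_by
  · have h1 : lo + 1 ≤ PySem.Int.floordiv (lo + hi) 2 := by
      rw [PySem.Int.le_floordiv_iff_mul_le (by omega)]; omega
    omega
  · have h2 : PySem.Int.floordiv (lo + hi) 2 < hi := by
      rw [PySem.Int.floordiv_lt_iff_lt_mul (by omega)]; omega
    have h1 : lo + 1 ≤ PySem.Int.floordiv (lo + hi) 2 := by
      rw [PySem.Int.le_floordiv_iff_mul_le (by omega)]; omega
    omega

def minimumPerimeter (neededApples : Int) : Int := loopA neededApples 0 100000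

-- ===== PORT B =====
-- same `calc` helper as in Source B
def calcB (x : Int) : Int := x * (x + 1) * (2 * x + 1) * 2

-- the while-loop of B: linear scan, x increments until the cap or enough apples
def loopB (neededApples x : Int) : Int :=
  if _h : x < 100000 ∧ calcB x < neededApples then loopB neededApples (x + 1)
  else 8 * x
termination_by (100000 - x).toNat
decreasing_by omega

def minimumPerimeter_alt (neededApples : Int) : Int := loopB neededApples 1

-- ===== PRECONDITION & SPEC =====
def Spec_minimumPerimeter (neededApples : Int) (out : Int) : Prop := out = minimumPerimeter_alt neededApples
instance (neededApples : Int) (out : Int) : Decidable (Spec_minimumPerimeter neededApples out) := by unfold Spec_minimumPerimeter; infer_instance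

-- ===== CLAIM (what is proved, stated in full; the proofs are below) =====
def Claim_equal_minimumPerimeter : Prop := ∀ (neededApples : Int), Dom_minimumPerimeter neededApples → Spec_minimumPerimeter neededApples (minimumPerimeter neededApples)

-- ===== LEMMAS AND PROOFS =====

-- characterisation both loops satisfy: the result is 8*x for the least x in [1,100000]
-- with calcA x ≥ neededApples, or x = 100000 if there is none
def Good (neededApples out : Int) : Prop :=
  ∃ x : Int, out = 8 * x ∧ 1 ≤ x ∧ x ≤ 100000 ∧
    (∀ y : Int, 1 ≤ y → y < x → calcA y < neededApples) ∧
    (neededApples ≤ calcA x ∨ x = 100000)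

theorem calcA_strictMono {a b : Int} (ha : 0 ≤ a) (hab : a < b) : calcA a < calcA b := by
  unfold calcA; nlinarith [sq_nonneg a, sq_nonneg b, sq_nonneg (a + b)]

theorem calcA_mono {a b : Int} (ha : 0 ≤ a) (hab : a ≤ b) : calcA a ≤ calcA b := by
  rcases eq_or_lt_of_le hab with rfl | h
  · exact le_refl _
  · exact le_of_lt (calcA_strictMono ha h)

theorem Good_unique {neededApples o₁ o₂ : Int}
    (h₁ : Good neededApples o₁) (h₂ : Good neededApples o₂) : o₁ = o₂ := by
  obtain ⟨x₁, rfl, hx₁1, hx₁2, hlt₁, hge₁⟩ := h₁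
  obtain ⟨x₂, rfl, hx₂1, hx₂2, hlt₂, hge₂⟩ := h₂
  rcases lt_trichotomy x₁ x₂ with h | h | h
  · -- calcA x₁ < neededApples by hlt₂, so x₁ = 100000, contradicting x₁ < x₂ ≤ 100000
    have := hlt₂ x₁ hx₁1 h
    rcases hge₁ with hc | hc
    · omega
    · omega
  · rw [h]
  · have := hlt₁ x₂ hx₂1 h
    rcases hge₂ with hc | hc
    · omega
    · omega

theorem loopB_good (neededApples : Int) :
    ∀ (n : Nat) (x : Int), (100000 - x).toNat = n → 1 ≤ x → x ≤ 100000 →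
      (∀ y : Int, 1 ≤ y → y < x → calcA y < neededApples) →
      Good neededApples (loopB neededApples x) := by
  intro n
  induction n using Nat.strong_induction_on with
  | _ n ih =>
    intro x hn hx1 hx2 hlt
    rw [loopB]
    split
    · rename_i h
      refine ih ((100000 - (x + 1)).toNat) (by omega) (x + 1) rfl (by omega) (by omega) ?_
      intro y hy1 hy2
      rcases lt_or_eq_of_le (by omega : y ≤ x) with h' | h'
      · exact hlt y hy1 h'
      · subst h'; exact h.2
    · rename_i h
      push_neg at h
      refine ⟨x, rfl, hx1, hx2, hlt, ?_⟩
      by_cases hc : x < 100000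
      · exact Or.inl (h hc)
      · exact Or.inr (by omega)

theorem loopA_good (neededApples : Int) :
    ∀ (n : Nat) (lo hi : Int), (hi - lo).toNat = n → 0 ≤ lo → lo < hi → hi ≤ 100000 →
      (∀ y : Int, 1 ≤ y → y ≤ lo → calcA y < neededApples) →
      (neededApples ≤ calcA hi ∨ hi = 100000) →
      Good neededApples (loopA neededApples lo hi) := by
  intro n
  induction n using Nat.strong_induction_on with
  | _ n ih =>
    intro lo hi hn hlo hlohi hhi hbelow habove
    rw [loopA]
    split
    · rename_i h
      have hmid1 : lo + 1 ≤ PySem.Int.floordiv (lo + hi) 2 := by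
        rw [PySem.Int.le_floordiv_iff_mul_le (by omega)]; omega
      have hmid2 : PySem.Int.floordiv (lo + hi) 2 < hi := by
        rw [PySem.Int.floordiv_lt_iff_lt_mul (by omega)]; omega
      set mid := PySem.Int.floordiv (lo + hi) 2 with hmid
      split
      · -- calcA mid = neededApples : A returns mid * 8
        rename_i heq
        refine ⟨mid, by ring, by omega, by omega, ?_, Or.inl (le_of_eq heq.symm)⟩
        intro y hy1 hy2
        calc calcA y < calcA mid := calcA_strictMono (by omega) hy2
          _ = neededApples := heq
      · split
        · -- calcA mid < neededApples : recurse on (mid, hi)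
          rename_i hne hlt
          refine ih ((hi - mid).toNat) (by omega) mid hi rfl (by omega) (by omega) hhi ?_ habove
          intro y hy1 hy2
          exact lt_of_le_of_lt (calcA_mono (by omega) hy2) hlt
        · -- neededApples < calcA mid : recurse on (lo, mid)
          rename_i hne hge
          refine ih ((mid - lo).toNat) (by omega) lo mid rfl hlo (by omega) (by omega) hbelow ?_
          exact Or.inl (by omega)
    · -- loop ends: hi = lo + 1, return 8 * hi
      rename_i h
      have : hi = lo + 1 := by omega
      refine ⟨hi, rfl, by omega, hhi, ?_, habove⟩
      intro y hy1 hy2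
      exact hbelow y hy1 (by omega)

-- ===== VERDICT (by name: the statement is the Claim_ definition above) =====
theorem minimumPerimeter_spec : Claim_equal_minimumPerimeter := by
  intro neededApples _
  unfold Spec_minimumPerimeter minimumPerimeter minimumPerimeter_alt
  exact Good_unique
    (loopA_good neededApples 100000 0 100000 rfl (by omega) (by omega) (by omega)
      (by intro y h1 h2; omega) (Or.inr rfl))
    (loopB_good neededApples ((100000 - 1 : Int).toNat) 1 rfl (by omega) (by omega)
      (by intro y h1 h2; omega))
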